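-- pv_equiv track=rewrite | github.com/zkawoosa/recipesuggestion | match.py | checkMatchingWords
-- ===== SOURCE A (Python) =====
-- def string_ldistance(a, b):
--     # Create len(a) + 1 by len(b) + 1 matrix of zeros
--     matrix = [[0 for j in range(len(b)+1)] for i in range(len(a)+1)]
--
--     # Preset values of matrix before dp
--     for i in range(len(a)+1):
--         matrix[i][0] = i
--     for j in range(len(b)+1):
--         matrix[0][j] = j
--
--     # Dynamically compute matrix values, return value at len(a), len(b)
--     for i in range(1, len(a)+1):
--         for j in range(1, len(b)+1):
--             if a[i-1] == b[j-1]: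
--                 matrix[i][j] = matrix[i-1][j-1]
--             else:
--                 matrix[i][j] = 1 + \
--                     min(matrix[i-1][j], matrix[i][j-1], matrix[i-1][j-1])
--
--     return matrix[len(a)][len(b)]
--
-- def checkMatchingWords(a, b):
--     aSet = set()
--     bSet = set()
--     aList = a.split()
--     bList = b.split()
--     for word in aList:
--         if "," in word:
--             wordList = word.split(",")
--             for w in wordList:
--                 aSet.add(w)
--         else:
--             aSet.add(word)
--     for word in bList:
--         if "," in word:
--             wordList = word.split(",")
--             for w in wordList:
--                 bSet.add(w)
--         else:
--             bSet.add(word)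
--
--     # check for ingredients with "fuzzy matching"
--     # if levenstein difference b/w ingredients is less than 3, then they are considered a match (allows for typos)
--     for word in aSet:
--         matched = False
--         for ingredient in bSet:
--             if string_ldistance(word, ingredient) < 3:
--                 matched = True
--                 break
--         if not matched:
--             return False
--     return True
-- ===== SOURCE B (Python) =====
-- def _within(a, b, i, j, k):
--     # bounded-distance check: is the edit distance of a[:i] and b[:j] at most k?
--     # recursion depth in k is at most 2, so this is linear in i+j, no DP table.
--     if i == 0:
--         return j <= k
--     if j == 0:
--         return i <= k
--     if a[i - 1] == b[j - 1]:
--         return _within(a, b, i - 1, j - 1, k)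
--     if k == 0:
--         return False
--     return (_within(a, b, i - 1, j, k - 1)
--             or _within(a, b, i, j - 1, k - 1)
--             or _within(a, b, i - 1, j - 1, k - 1))
--
-- def _words(s):
--     out = set()
--     for word in s.split():
--         out.update(word.split(","))
--     return out
--
-- def checkMatchingWords(a, b):
--     bSet = _words(b)
--     return all(any(_within(w, ing, len(w), len(ing), 2) for ing in bSet)
--                for w in _words(a))
-- ===== Notes on version B (the rewrite author's own statement) =====
-- stated objective: faster
-- what changed: B replaces A's full (len(a)+1)x(len(b)+1) Levenshtein DP matrix by a threshold-bounded recursive check 'is the edit distance at most 2' whose branching depth is capped by the fixed budget k=2 (so linear in the word lengths, no table), builds each word set with one unconditional set.update(word.split(',')) instead of A's comma-branch with an inner add loop, and replaces the break/flag matching loops by all(any(...)).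
import Mathlib
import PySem

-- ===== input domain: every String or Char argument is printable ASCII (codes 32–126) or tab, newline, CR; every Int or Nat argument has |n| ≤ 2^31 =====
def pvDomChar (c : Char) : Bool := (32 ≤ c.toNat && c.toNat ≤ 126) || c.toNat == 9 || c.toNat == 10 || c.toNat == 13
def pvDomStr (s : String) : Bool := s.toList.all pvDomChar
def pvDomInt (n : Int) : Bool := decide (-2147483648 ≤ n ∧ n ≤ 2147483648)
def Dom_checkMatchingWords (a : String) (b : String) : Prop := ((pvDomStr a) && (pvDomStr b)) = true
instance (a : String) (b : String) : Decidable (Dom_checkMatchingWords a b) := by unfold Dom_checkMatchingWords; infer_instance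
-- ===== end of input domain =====

-- B drops the DP matrix entirely: since the threshold is fixed (< 3), it decides
-- "edit distance ≤ k" by a depth-k-bounded recursion on the two string prefixes
-- (linear in the word lengths for k = 2), builds each word set with one
-- unconditional update, and replaces the break/flag loops by all/any.

-- ===== PORT A =====
-- Python: string_ldistance(a, b) — full DP matrix, preset first row/column, fill, read corner
def string_ldistance (sa sb : String) : Nat :=
  let a := sa.toList
  let b := sb.toList
  let la := a.length
  let lb := b.length
  -- matrix = [[0 …] …]
  let m0 : List (List Nat) := (List.range (la+1)).map (fun _ => (List.range (lb+1)).map (fun _ => 0))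
  -- for i in range(la+1): matrix[i][0] = i
  let m1 := (List.range (la+1)).foldl (fun m i => m.set i ((m.getD i []).set 0 i)) m0
  -- for j in range(lb+1): matrix[0][j] = j
  let m2 := (List.range (lb+1)).foldl (fun m j => m.set 0 ((m.getD 0 []).set j j)) m1
  -- for i in range(1, la+1): for j in range(1, lb+1): matrix[i][j] = …
  let m3 := (List.range' 1 la).foldl (fun m i =>
      (List.range' 1 lb).foldl (fun m j =>
        m.set i ((m.getD i []).set j
          (if a.getD (i-1) ' ' == b.getD (j-1) ' ' then (m.getD (i-1) []).getD (j-1) 0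
           else 1 + min (min ((m.getD (i-1) []).getD j 0) ((m.getD i []).getD (j-1) 0))
                        ((m.getD (i-1) []).getD (j-1) 0)))) m) m2
  (m3.getD la []).getD lb 0

-- the two identical set-building loops of A (word.split(",") is 'some' since "," ≠ "")
def buildWordSet (s : String) : PySem.Set String :=
  (PySem.Str.split₀ s).foldl (fun st word =>
    if PySem.Str.isIn "," word then
      ((PySem.Str.split? word ",").getD []).foldl PySem.Set.add st
    else PySem.Set.add st word) PySem.Set.empty

-- inner loop: matched = False; for ingredient in bSet: if dist < 3: matched = True; break
def matchLoopInner (word : String) : List String → Bool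
  | [] => false
  | ing :: rest => if string_ldistance word ing < 3 then true else matchLoopInner word rest

-- outer loop: for word in aSet: … ; if not matched: return False; … return True
def matchLoopOuter (bSet : List String) : List String → Bool
  | [] => true
  | w :: ws => if matchLoopInner w bSet then matchLoopOuter bSet ws else false

def checkMatchingWords (a : String) (b : String) : Bool :=
  matchLoopOuter (buildWordSet b) (buildWordSet a)

-- ===== PORT B =====
-- Python B: _within(a, b, i, j, k) — bounded-distance check by recursion, no table
def within (a b : List Char) : Nat → Nat → Nat → Bool
  | 0, j, k => decide (j ≤ k)
  | i+1, 0, k => decide (i+1 ≤ k)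
  | i+1, j+1, k =>
    if a.getD i ' ' == b.getD j ' ' then within a b i j k
    else match k with
      | 0 => false
      | k+1 => within a b i (j+1) k || within a b (i+1) j k || within a b i j k
termination_by i j _ => (i, j)

-- Python B: _words — one unconditional set.update(word.split(","))
def wordsOf (s : String) : PySem.Set String :=
  (PySem.Str.split₀ s).foldl
    (fun st word => PySem.Set.update st ((PySem.Str.split? word ",").getD [])) PySem.Set.empty

-- Python B: all(any(_within(w, ing, len(w), len(ing), 2) ...))
def checkMatchingWords_alt (a : String) (b : String) : Bool :=
  let bSet := wordsOf b
  (wordsOf a).all (fun w =>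
    bSet.any (fun ing => within w.toList ing.toList w.toList.length ing.toList.length 2))

-- ===== PRECONDITION & SPEC =====
def Spec_checkMatchingWords (a : String) (b : String) (out : Bool) : Prop := out = checkMatchingWords_alt a b
instance (a : String) (b : String) (out : Bool) : Decidable (Spec_checkMatchingWords a b out) := by unfold Spec_checkMatchingWords; infer_instance

-- ===== CLAIM (what is proved, stated in full; the proofs are below) =====
def Claim_equal_checkMatchingWords : Prop := ∀ (a : String) (b : String), Dom_checkMatchingWords a b → Spec_checkMatchingWords a b (checkMatchingWords a b)

-- ===== LEMMAS AND PROOFS =====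

-- reference edit distance on PREFIX lengths: levP a b i j = distance of (take i a) (take j b)
def levP (a b : List Char) : Nat → Nat → Nat
  | 0, j => j
  | i+1, 0 => i+1
  | i+1, j+1 =>
    if a.getD i ' ' == b.getD j ' ' then levP a b i j
    else 1 + min (min (levP a b i (j+1)) (levP a b (i+1) j)) (levP a b i j)
termination_by i j => (i, j)

lemma levP_zero (a b : List Char) (j : Nat) : levP a b 0 j = j := by
  cases j <;> simp [levP]

-- generic "fill each slot once, left to right" fold
lemma foldl_set_range {α : Type} (d : α) (g : Nat → α → α) :
    ∀ (n : Nat) (m : List α), n ≤ m.length →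
    (List.range n).foldl (fun m i => m.set i (g i (m.getD i d))) m
      = ((List.range n).map (fun i => g i (m.getD i d))) ++ m.drop n := by
  intro n
  induction n with
  | zero => intro m _; simp
  | succ n ih =>
    intro m hm
    rw [List.range_succ, List.foldl_append, ih m (by omega)]
    have hn : n < m.length := by omega
    have hlen : ((List.range n).map (fun i => g i (m.getD i d))).length = n := by simp
    have hget : (((List.range n).map (fun i => g i (m.getD i d))) ++ m.drop n).getD n d
        = m.getD n d := by
      rw [List.getD_eq_getElem _ _ (by simp [List.length_drop]; omega),
          List.getD_eq_getElem _ _ hn]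
      rw [List.getElem_append_right (by omega)]
      simp
    simp only [List.foldl_cons, List.foldl_nil, hget]
    rw [List.set_append]
    simp only [hlen, lt_irrefl, Nat.sub_self]
    rw [List.map_append]
    conv_lhs => rw [List.drop_eq_getElem_cons hn]
    rw [List.set_cons_zero]
    simp

-- fold that only rewrites slot i, reading slots p and i
lemma foldl_set_at {α : Type} (d : α) (i p : Nat) (hpi : p ≠ i)
    (f : Nat → α → α → α) :
    ∀ (js : List Nat) (m : List α), i < m.length →
    js.foldl (fun m j => m.set i (f j (m.getD p d) (m.getD i d))) m
      = m.set i (js.foldl (fun r j => f j (m.getD p d) r) (m.getD i d)) := by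
  intro js
  induction js with
  | nil =>
    intro m hm
    simp only [List.foldl_nil]
    rw [List.getD_eq_getElem _ _ hm, List.set_getElem_self]
  | cons j js ih =>
    intro m hm
    simp only [List.foldl_cons]
    rw [ih _ (by simpa using hm)]
    have h1 : (m.set i (f j (m.getD p d) (m.getD i d))).getD p d = m.getD p d := by
      simp [List.getD, List.getElem?_set_ne (Ne.symm hpi)]
    have h2 : (m.set i (f j (m.getD p d) (m.getD i d))).getD i d
        = f j (m.getD p d) (m.getD i d) := by
      simp [List.getD, hm]
    rw [h1, h2, List.set_set]


lemma levP_zero_right (a b : List Char) (i : Nat) (hi : 1 ≤ i) : levP a b i 0 = i := by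
  cases i with
  | zero => omega
  | succ k => simp [levP]

lemma levP_succ_succ (a b : List Char) (i j : Nat) (hi : 1 ≤ i) :
    levP a b i (j+1) =
      if a.getD (i-1) ' ' == b.getD j ' ' then levP a b (i-1) j
      else 1 + min (min (levP a b (i-1) (j+1)) (levP a b i j)) (levP a b (i-1) j) := by
  cases i with
  | zero => omega
  | succ k => simp [levP]

-- row of the reference table: Rrow i = [levP i 0, …, levP i lb]
-- (written out inline below as (List.range (b.length+1)).map (levP a b i))

lemma Rrow_zero (a b : List Char) :
    (List.range (b.length+1)).map (levP a b 0) = List.range (b.length+1) := by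
  have : (List.range (b.length+1)).map (levP a b 0) = (List.range (b.length+1)).map id := by
    apply List.map_congr_left; intro j _; simp [levP_zero]
  simpa using this

-- A's inner row fold (after the matrix has been collapsed to a row fold) fills row i
lemma row_fillA (a b : List Char) (i : Nat) (hi : 1 ≤ i) :
    ∀ t, t ≤ b.length →
    (List.range' 1 t).foldl (fun r j =>
      r.set j (if a.getD (i-1) ' ' == b.getD (j-1) ' '
               then ((List.range (b.length+1)).map (levP a b (i-1))).getD (j-1) 0
               else 1 + min (min (((List.range (b.length+1)).map (levP a b (i-1))).getD j 0)
                                 (r.getD (j-1) 0))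
                            (((List.range (b.length+1)).map (levP a b (i-1))).getD (j-1) 0)))
      (i :: List.replicate b.length 0)
    = (List.range (t+1)).map (levP a b i) ++ List.replicate (b.length - t) 0 := by
  intro t
  induction t with
  | zero =>
    intro _
    simp [levP_zero_right a b i hi]
  | succ t ih =>
    intro ht
    rw [List.range'_concat, List.foldl_append, ih (by omega)]
    have e1 : 1 + 1 * t = t + 1 := by omega
    simp only [e1, List.foldl_cons, List.foldl_nil, Nat.add_sub_cancel]
    rw [List.getD_append _ _ _ _ (by simp),
        PySem.List.getD_map_range (levP a b (i-1)) (b.length+1) (t+1) 0 (by omega),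
        PySem.List.getD_map_range (levP a b (i-1)) (b.length+1) t 0 (by omega),
        PySem.List.getD_map_range (levP a b i) (t+1) t 0 (by omega)]
    rw [← levP_succ_succ a b i t hi]
    rw [List.set_append]
    have hlen : ((List.range (t+1)).map (levP a b i)).length = t + 1 := by simp
    rw [hlen]
    simp only [lt_irrefl, if_false, Nat.sub_self]
    have e2 : b.length - t = (b.length - (t+1)) + 1 := by omega
    rw [e2, List.replicate_succ, List.set_cons_zero]
    simp [List.range_succ]

-- the matrix after the two preset loops, described as T 0, and the outer fill
lemma matA_outer (a b : List Char) :
    ∀ (k i : Nat), i + k ≤ a.length →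
    (List.range' (i+1) k).foldl (fun m i =>
      (List.range' 1 b.length).foldl (fun m j =>
        m.set i ((m.getD i []).set j
          (if a.getD (i-1) ' ' == b.getD (j-1) ' ' then (m.getD (i-1) []).getD (j-1) 0
           else 1 + min (min ((m.getD (i-1) []).getD j 0) ((m.getD i []).getD (j-1) 0))
                        ((m.getD (i-1) []).getD (j-1) 0)))) m)
      ((List.range (i+1)).map (fun r => (List.range (b.length+1)).map (levP a b r)) ++
        (List.range' (i+1) (a.length - i)).map (fun r => r :: List.replicate b.length 0))
    = (List.range (i+k+1)).map (fun r => (List.range (b.length+1)).map (levP a b r)) ++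
        (List.range' (i+k+1) (a.length - (i+k))).map (fun r => r :: List.replicate b.length 0) := by
  intro k
  induction k with
  | zero => intro i h; simp
  | succ k ih =>
    intro i h
    rw [show i + (k+1) = i+1+k from by omega]
    rw [List.range'_succ, List.foldl_cons]
    have hlen1 : ((List.range (i+1)).map (fun r => (List.range (b.length+1)).map (levP a b r))).length = i+1 := by
      simp
    have hlenT : ((List.range (i+1)).map (fun r => (List.range (b.length+1)).map (levP a b r)) ++
        (List.range' (i+1) (a.length - i)).map (fun r => r :: List.replicate b.length 0)).length
        = a.length + 1 := by
      simp only [List.length_append, List.length_map, List.length_range, List.length_range']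
      omega
    have hstep := foldl_set_at ([] : List Nat) (i+1) (i+1-1) (by omega)
        (fun j P R => R.set j (if a.getD (i+1-1) ' ' == b.getD (j-1) ' ' then P.getD (j-1) 0
          else 1 + min (min (P.getD j 0) (R.getD (j-1) 0)) (P.getD (j-1) 0)))
        (List.range' 1 b.length)
        ((List.range (i+1)).map (fun r => (List.range (b.length+1)).map (levP a b r)) ++
          (List.range' (i+1) (a.length - i)).map (fun r => r :: List.replicate b.length 0))
        (by rw [hlenT]; omega)
    rw [hstep]
    have hgetPrev : (((List.range (i+1)).map (fun r => (List.range (b.length+1)).map (levP a b r)) ++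
        (List.range' (i+1) (a.length - i)).map (fun r => r :: List.replicate b.length 0)).getD (i+1-1) ([] : List Nat))
        = (List.range (b.length+1)).map (levP a b i) := by
      rw [Nat.add_sub_cancel, List.getD_append _ _ _ _ (by rw [hlen1]; omega)]
      exact PySem.List.getD_map_range _ _ _ _ (by omega)
    have hgetCur : (((List.range (i+1)).map (fun r => (List.range (b.length+1)).map (levP a b r)) ++
        (List.range' (i+1) (a.length - i)).map (fun r => r :: List.replicate b.length 0)).getD (i+1) ([] : List Nat))
        = (i+1) :: List.replicate b.length 0 := by
      rw [List.getD_eq_getElem _ _ (by rw [hlenT]; omega),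
          List.getElem_append_right (by rw [hlen1])]
      simp [hlen1]
    rw [hgetPrev, hgetCur]
    have hrow := row_fillA a b (i+1) (by omega) b.length le_rfl
    simp only [Nat.sub_self, List.replicate_zero, List.append_nil, Nat.add_sub_cancel] at hrow
    simp only [Nat.add_sub_cancel]
    rw [hrow]
    have hset : (((List.range (i+1)).map (fun r => (List.range (b.length+1)).map (levP a b r)) ++
        (List.range' (i+1) (a.length - i)).map (fun r => r :: List.replicate b.length 0)).set (i+1)
          ((List.range (b.length+1)).map (levP a b (i+1))))
        = (List.range (i+1+1)).map (fun r => (List.range (b.length+1)).map (levP a b r)) ++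
          (List.range' (i+1+1) (a.length - (i+1))).map (fun r => r :: List.replicate b.length 0) := by
      rw [List.set_append, hlen1]
      simp only [lt_irrefl, if_false, Nat.sub_self]
      rw [show a.length - i = (a.length - (i+1)) + 1 from by omega, List.range'_succ,
          List.map_cons, List.set_cons_zero,
          show List.range (i+1+1) = List.range (i+1) ++ [i+1] from List.range_succ,
          List.map_append]
      simp
    rw [hset]
    exact ih (i+1) (by omega)

-- the untouched matrix rows
lemma row0_set (lb r : Nat) :
    ((List.range (lb+1)).map (fun _ => 0)).set 0 r = r :: List.replicate lb 0 := by
  have h0 : (List.range (lb+1)).map (fun _ => (0:Nat)) = List.replicate (lb+1) 0 := by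
    simp [List.map_const']
  rw [h0, List.replicate_succ, List.set_cons_zero]

lemma string_ldistance_eq_levP (sa sb : String) :
    string_ldistance sa sb = levP sa.toList sb.toList sa.toList.length sb.toList.length := by
  have hz : string_ldistance sa sb =
      ((((List.range' 1 sa.toList.length).foldl (fun m i =>
          (List.range' 1 sb.toList.length).foldl (fun m j =>
            m.set i ((m.getD i []).set j
              (if sa.toList.getD (i-1) ' ' == sb.toList.getD (j-1) ' '
               then (m.getD (i-1) []).getD (j-1) 0
               else 1 + min (min ((m.getD (i-1) []).getD j 0) ((m.getD i []).getD (j-1) 0))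
                            ((m.getD (i-1) []).getD (j-1) 0)))) m)
          ((List.range (sb.toList.length+1)).foldl (fun m j => m.set 0 ((m.getD 0 []).set j j))
            ((List.range (sa.toList.length+1)).foldl (fun m i => m.set i ((m.getD i []).set 0 i))
              ((List.range (sa.toList.length+1)).map (fun _ => (List.range (sb.toList.length+1)).map (fun _ => 0)))))).getD
        sa.toList.length []).getD sb.toList.length 0) := rfl
  rw [hz]
  have h1 : (List.range (sa.toList.length+1)).foldl (fun m i => m.set i ((m.getD i []).set 0 i))
        ((List.range (sa.toList.length+1)).map (fun _ => (List.range (sb.toList.length+1)).map (fun _ => 0)))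
      = (List.range (sa.toList.length+1)).map (fun i => i :: List.replicate sb.toList.length 0) := by
    rw [foldl_set_range ([] : List Nat) (fun i row => row.set 0 i) (sa.toList.length+1) _ (by simp)]
    have hd : ((List.range (sa.toList.length+1)).map
        (fun _ => (List.range (sb.toList.length+1)).map (fun _ => (0:Nat)))).drop (sa.toList.length+1) = [] := by
      simp
    rw [hd, List.append_nil]
    apply List.map_congr_left
    intro i hi
    rw [PySem.List.getD_map_range _ _ _ _ (by simpa using List.mem_range.mp hi)]
    exact row0_set sb.toList.length i
  rw [h1]
  have h2 : (List.range (sb.toList.length+1)).foldl (fun m j => m.set 0 ((m.getD 0 []).set j j))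
        ((List.range (sa.toList.length+1)).map (fun i => i :: List.replicate sb.toList.length 0))
      = (List.range 1).map (fun r => (List.range (sb.toList.length+1)).map (levP sa.toList sb.toList r)) ++
        (List.range' 1 sa.toList.length).map (fun r => r :: List.replicate sb.toList.length 0) := by
    rw [foldl_set_at ([] : List Nat) 0 1 (by omega) (fun j P R => R.set j j) _ _ (by simp)]
    rw [PySem.List.getD_map_range _ _ _ _ (by omega)]
    have hrow : (List.range (sb.toList.length+1)).foldl (fun r j => r.set j j)
        ((0:Nat) :: List.replicate sb.toList.length 0)
        = List.range (sb.toList.length+1) := by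
      rw [foldl_set_range (0 : Nat) (fun j _ => j) (sb.toList.length+1) _ (by simp)]
      have hd : ((0:Nat) :: List.replicate sb.toList.length 0).drop (sb.toList.length+1) = [] := by
        simp
      rw [hd, List.append_nil, List.map_id']
    rw [hrow]
    rw [show List.range (sa.toList.length+1) = List.range' 0 (sa.toList.length+1) from List.range_eq_range',
        List.range'_succ, List.map_cons, List.set_cons_zero]
    simp only [List.range_one, List.map_cons, List.map_nil, List.singleton_append]
    rw [Rrow_zero]
  rw [h2]
  have h3 := matA_outer sa.toList sb.toList sa.toList.length 0 (by omega)
  simp only [Nat.zero_add, Nat.sub_zero, Nat.sub_self, List.range'_zero,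
    List.map_nil, List.append_nil] at h3
  rw [h3]
  rw [PySem.List.getD_map_range _ _ _ _ (by omega),
      PySem.List.getD_map_range _ _ _ _ (by omega)]

-- B's bounded recursion decides "levP ≤ k"
lemma within_eq_levP (a b : List Char) :
    ∀ (i j k : Nat), within a b i j k = decide (levP a b i j ≤ k) := by
  intro i
  induction i with
  | zero => intro j k; simp [within, levP_zero]
  | succ i ihi =>
    intro j
    induction j with
    | zero => intro k; simp [within, levP]
    | succ j ihj =>
      intro k
      rw [within.eq_def, levP]
      by_cases hc : a.getD i ' ' == b.getD j ' '
      · simp only [hc, if_true, ihi]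
      · simp only [hc, Bool.false_eq_true, if_false]
        cases k with
        | zero => simp
        | succ k =>
          show (within a b i (j+1) k || within a b (i+1) j k || within a b i j k) = _
          rw [ihi (j+1) k, ihj k, ihi j k]
          rw [Bool.eq_iff_iff]
          simp only [Bool.or_eq_true, decide_eq_true_eq]
          omega

lemma dist_within (w ing : String) :
    decide (string_ldistance w ing < 3)
      = within w.toList ing.toList w.toList.length ing.toList.length 2 := by
  rw [string_ldistance_eq_levP, within_eq_levP, decide_eq_decide]
  omega

lemma splitOn_go_nocomma :
    ∀ (l : List Char) (fuel : Nat) (cur : List Char) (acc : List (List Char)),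
      (∀ c ∈ l, c ≠ ',') → l.length < fuel →
      PySem.Chars.splitOn.go [','] fuel l cur acc = acc.reverse ++ [cur.reverse ++ l] := by
  intro l
  induction l with
  | nil =>
    intro fuel cur acc _ hf
    cases fuel with
    | zero => omega
    | succ f => simp [PySem.Chars.splitOn.go]
  | cons c rest ih =>
    intro fuel cur acc h hf
    cases fuel with
    | zero => simp at hf
    | succ f =>
      have hc : c ≠ ',' := h c (by simp)
      have hpre : List.isPrefixOf [','] (c :: rest) = false := by
        simp [List.isPrefixOf, beq_eq_false_iff_ne]
        exact fun hcc => absurd hcc.symm hc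
      rw [PySem.Chars.splitOn.go]
      rw [hpre]
      simp only [Bool.false_eq_true, if_false]
      rw [ih f (c :: cur) acc (fun x hx => h x (List.mem_cons_of_mem c hx)) (by simpa using hf)]
      simp

lemma splitComma_nocomma (word : String) (h : PySem.Str.isIn "," word = false) :
    (PySem.Str.split? word ",").getD [] = [word] := by
  have hmem : ∀ c ∈ word.toList, c ≠ ',' := by
    intro c hc hceq
    have hinf : (",".toList) <:+: word.toList := by
      rw [show (",".toList) = [','] from rfl, List.singleton_infix_iff]
      exact hceq ▸ hc
    rw [← PySem.Str.isIn_iff_infix] at hinf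
    have h' : PySem.Chars.isIn [','] word.toList = false := h
    simp [h'] at hinf
  have hsplit : PySem.Chars.splitOn word.toList [','] = [word.toList] := by
    unfold PySem.Chars.splitOn
    rw [splitOn_go_nocomma word.toList (word.toList.length+1) [] [] hmem (by omega)]
    simp
  simp [PySem.Str.split?, PySem.Chars.split?, show (",".toList) = [','] from rfl, hsplit]

lemma buildWordSet_eq (s : String) : buildWordSet s = wordsOf s := by
  unfold buildWordSet wordsOf
  have hstep : (fun (st : PySem.Set String) word =>
      if PySem.Str.isIn "," word then
        ((PySem.Str.split? word ",").getD []).foldl PySem.Set.add st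
      else PySem.Set.add st word)
      = (fun (st : PySem.Set String) word =>
        PySem.Set.update st ((PySem.Str.split? word ",").getD [])) := by
    funext st word
    by_cases hw : PySem.Str.isIn "," word = true
    · rw [if_pos hw]
      rfl
    · rw [if_neg hw]
      simp only [Bool.not_eq_true] at hw
      rw [splitComma_nocomma word hw]
      rfl
  rw [hstep]

lemma inner_any (w : String) (bs : List String) :
    matchLoopInner w bs = bs.any (fun ing => string_ldistance w ing < 3) := by
  induction bs with
  | nil => simp [matchLoopInner]
  | cons ing rest ih => by_cases h : string_ldistance w ing < 3 <;> simp [matchLoopInner, h, ih]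

lemma outer_all (bs : List String) (ws : List String) :
    matchLoopOuter bs ws = ws.all (fun w => matchLoopInner w bs) := by
  induction ws with
  | nil => simp [matchLoopOuter]
  | cons w ws ih => by_cases h : matchLoopInner w bs <;> simp [matchLoopOuter, h, ih]

-- ===== VERDICT (by name: the statement is the Claim_ definition above) =====
theorem checkMatchingWords_spec : Claim_equal_checkMatchingWords := by
  intro a b _
  show checkMatchingWords a b = checkMatchingWords_alt a b
  unfold checkMatchingWords checkMatchingWords_alt
  rw [buildWordSet_eq, buildWordSet_eq, outer_all]
  simp only [List.all_eq, List.any_eq, inner_any, dist_within]
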